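-- pv_equiv track=rewrite | github.com/Schroters/Learning-project | Codewars/Moves in squared strings (All).py | selfie_and_diag1
-- ===== SOURCE A (Python) =====
-- def selfie_and_diag1(s):
--     s = s.split('\n')
--     new_list, time_line = [], ''
--     for i in range(len(s)):
--         for j in range(len(s)):
--             time_line += s[j][i]
--         time_line = s[i] + '|' + time_line
--         new_list.append(time_line)
--         time_line = ''
--     new_s = '\n'.join(new_list)
--     return new_s
-- ===== SOURCE B (Python) =====
-- def selfie_and_diag1(s):
--     rows = s.split('\n')
--     acc = [row + '|' for row in rows]
--     for row in rows:
--         acc = [line + row[i] for i, line in enumerate(acc)]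
--     return '\n'.join(acc)
-- ===== Notes on version B (the rewrite author's own statement) =====
-- stated objective: alternative
-- what changed: Replaced A's column-by-column gather (inner loop reads s[j][i] across all rows to build each output line in turn) by a row-by-row scatter: every output line is seeded with its original row plus the bar up front, and one pass over the rows appends each row's characters to the matching line accumulators.
import Mathlib
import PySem

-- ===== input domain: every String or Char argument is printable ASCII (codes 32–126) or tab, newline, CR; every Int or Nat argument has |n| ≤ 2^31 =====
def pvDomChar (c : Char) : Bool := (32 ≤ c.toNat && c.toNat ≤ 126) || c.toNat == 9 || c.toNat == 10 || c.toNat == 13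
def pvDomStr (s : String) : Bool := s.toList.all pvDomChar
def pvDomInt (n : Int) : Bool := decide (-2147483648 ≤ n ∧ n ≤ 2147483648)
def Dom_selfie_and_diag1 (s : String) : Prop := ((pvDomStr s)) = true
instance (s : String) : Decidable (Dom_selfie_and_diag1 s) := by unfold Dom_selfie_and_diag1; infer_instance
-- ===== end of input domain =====

-- B replaces A's column-by-column gather (inner loop reads column i across all rows) by a
-- row-by-row scatter: all output lines are kept as accumulators seeded with the original row plus the bar, and one
-- pass over the rows appends each row's characters to the matching accumulators.

-- ===== PORT A =====
-- A: split, then for each i accumulate column i char by char, prepend row i and '|', append to list, join.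
-- Inside Pre_ every indexed access is in range, so the .getD ' ' default is never used.
def selfie_and_diag1 (s : String) : String :=
  let lines := PySem.Chars.splitOn s.toList ['\n']
  let n : Int := lines.length
  let new_list := (PySem.List.pyRange 0 n 1).foldl (fun acc i =>
    let time_line := (PySem.List.pyRange 0 n 1).foldl (fun tl j =>
      tl ++ [(PySem.List.pyGet? (PySem.List.pyGetD lines j []) i).getD ' ']) ([] : List Char)
    let time_line := PySem.List.pyGetD lines i [] ++ ['|'] ++ time_line
    acc ++ [time_line]) ([] : List (List Char))
  String.ofList (PySem.Chars.join ['\n'] new_list)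

-- ===== PORT B =====
-- B: seed every output line with its row plus the bar, then one pass over the rows scatters each row's
-- characters onto the accumulators via enumerate.  Inside Pre_ the .getD ' ' default is unused.
def selfie_and_diag1_alt (s : String) : String :=
  let rows := PySem.Chars.splitOn s.toList ['\n']
  let acc0 := rows.map (fun row => row ++ ['|'])
  let acc := rows.foldl (fun acc row =>
    (PySem.List.enumerate acc).map (fun p =>
      p.2 ++ [(PySem.List.pyGet? row p.1).getD ' '])) acc0
  String.ofList (PySem.Chars.join ['\n'] acc)

-- ===== PRECONDITION & SPEC =====
-- Pre_: the Python A raises IndexError on s[j][i] whenever some split line is shorter than the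
-- number of lines (non-square input, incl. the empty string); exactly those inputs are excluded.
def Pre_selfie_and_diag1 (s : String) : Prop :=
  ∀ line ∈ PySem.Chars.splitOn s.toList ['\n'],
    (PySem.Chars.splitOn s.toList ['\n']).length ≤ line.length
instance (s : String) : Decidable (Pre_selfie_and_diag1 s) := by unfold Pre_selfie_and_diag1; infer_instance
def pvWitness_selfie_and_diag1 : String := "ab\ncd"

def Spec_selfie_and_diag1 (s : String) (out : String) : Prop := out = selfie_and_diag1_alt s
instance (s : String) (out : String) : Decidable (Spec_selfie_and_diag1 s out) := by unfold Spec_selfie_and_diag1; infer_instance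

-- ===== CLAIM (what is proved, stated in full; the proofs are below) =====
def Claim_equal_selfie_and_diag1 : Prop := ∀ (s : String), Dom_selfie_and_diag1 s → Pre_selfie_and_diag1 s → Spec_selfie_and_diag1 s (selfie_and_diag1 s)

-- ===== LEMMAS AND PROOFS =====

-- one scatter step: enumerate-map is mapIdx
theorem step_eq (row : List Char) (acc : List (List Char)) :
    (PySem.List.enumerate acc).map (fun p =>
      p.2 ++ [(PySem.List.pyGet? row p.1).getD ' '])
    = acc.mapIdx (fun i l => l ++ [(row[i]?).getD ' ']) := by
  apply List.ext_getElem
  · simp [PySem.List.length_enumerate]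
  · intro k hk1 hk2
    simp [PySem.List.getElem_enumerate]

-- the whole scatter fold: each accumulator i receives row i's char of every row, in order
theorem fold_eq (rs : List (List Char)) (acc : List (List Char)) :
    rs.foldl (fun acc row =>
      (PySem.List.enumerate acc).map (fun p =>
        p.2 ++ [(PySem.List.pyGet? row p.1).getD ' '])) acc
    = acc.mapIdx (fun i l => l ++ rs.map (fun row => (row[i]?).getD ' ')) := by
  induction rs generalizing acc with
  | nil =>
    simp only [List.foldl_nil, List.map_nil, List.append_nil]
    apply List.ext_getElem <;> simp
  | cons r rs ih =>
    rw [List.foldl_cons, step_eq, ih]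
    apply List.ext_getElem
    · simp
    · intro k hk1 hk2
      simp

-- reading column k via range indices equals mapping over the rows themselves
theorem map_range_eq (rows : List (List Char)) (k : Nat) :
    (List.range rows.length).map (fun j => ((rows.getD j [])[k]?).getD ' ')
    = rows.map (fun row => (row[k]?).getD ' ') := by
  apply List.ext_getElem
  · simp
  · intro j hj1 hj2
    simp only [List.length_map, List.length_range] at hj1
    simp [List.getD_eq_getElem?_getD, List.getElem?_eq_getElem hj1]

-- A's gather loop, as a function of the split rows, equals B's mapIdx form
theorem rows_eq (rows : List (List Char)) :
    (PySem.List.pyRange 0 (rows.length : Int) 1).foldl (fun acc i =>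
      acc ++ [PySem.List.pyGetD rows i [] ++ ['|'] ++
        (PySem.List.pyRange 0 (rows.length : Int) 1).foldl (fun tl j =>
          tl ++ [(PySem.List.pyGet? (PySem.List.pyGetD rows j []) i).getD ' ']) []]) []
    = (rows.map (fun row => row ++ ['|'])).mapIdx
        (fun i l => l ++ rows.map (fun row => (row[i]?).getD ' ')) := by
  rw [PySem.List.pyRange_zero_nat, PySem.List.foldl_append_singleton_eq_map]
  simp only [List.nil_append, List.map_map, Function.comp_def,
    PySem.List.foldl_append_singleton_eq_map, PySem.List.pyGetD_natCast,
    PySem.List.pyGet?_natCast]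
  apply List.ext_getElem
  · simp
  · intro k hk1 hk2
    simp only [List.length_map, List.length_range] at hk1
    simp only [List.getElem_map, List.getElem_range, List.getElem_mapIdx]
    rw [List.getD_eq_getElem?_getD, List.getElem?_eq_getElem hk1]
    simp only [Option.getD_some, List.append_assoc, map_range_eq]

theorem selfie_and_diag1_spec : Claim_equal_selfie_and_diag1 := by
  intro s _ _
  show _ = _
  simp only [selfie_and_diag1, selfie_and_diag1_alt]
  rw [fold_eq, rows_eq]
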